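-- pv_equiv track=rewrite | github.com/letaoZ/shua | DP/1043_Partition_Array_for_Maximum_Sum.py | maxSumAfterPartitioning_brutal_recurr_store_all_sum
-- ===== SOURCE A (Python) =====
-- from typing import List
--
-- def maxSumAfterPartitioning_brutal_recurr_store_all_sum(A: List[int], K: int) -> int:
--     if K == 1: return sum(A)
--     if K>=len(A): return max(A)*len(A)
--
--     ## min number of sets
--     N = len(A)//K
--     if N*K!=len(A):
--         N += 1
--
--     def searching(nums,res,res_list):
--         if len(nums)==0:
--             res_list.append(res)
--             return
--
--         for i in range(1,min(K+1,len(nums)+1)):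
--             psum = max(nums[:i])*i
--             searching(nums[i:],res+psum,res_list)
--     res = 0
--     res_list = []
--     searching(A,res,res_list)
--
--     return max(res_list)
-- ===== SOURCE B (Python) =====
-- from typing import List
--
-- def maxSumAfterPartitioning_brutal_recurr_store_all_sum(A: List[int], K: int) -> int:
--     # Dynamic programming over suffixes, built back-to-front:
--     # dp[j-1] holds the optimal partition sum for the suffix A[i+j:].
--     dp = [0]
--     for i in range(len(A) - 1, -1, -1):
--         cur = A[i]
--         best = cur + dp[0]
--         for j in range(2, min(K, len(dp)) + 1):
--             cur = max(cur, A[i + j - 1])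
--             cand = cur * j + dp[j - 1]
--             if cand > best:
--                 best = cand
--         dp.insert(0, best)
--     return dp[0]
-- ===== Notes on version B (the rewrite author's own statement) =====
-- stated objective: faster
-- what changed: A enumerates every partition recursively and takes the max of the collected list (exponential); B computes the optimum with a dynamic program over suffixes (dp[i] = best sum for A[i:]) with a running block maximum.
import Mathlib
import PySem

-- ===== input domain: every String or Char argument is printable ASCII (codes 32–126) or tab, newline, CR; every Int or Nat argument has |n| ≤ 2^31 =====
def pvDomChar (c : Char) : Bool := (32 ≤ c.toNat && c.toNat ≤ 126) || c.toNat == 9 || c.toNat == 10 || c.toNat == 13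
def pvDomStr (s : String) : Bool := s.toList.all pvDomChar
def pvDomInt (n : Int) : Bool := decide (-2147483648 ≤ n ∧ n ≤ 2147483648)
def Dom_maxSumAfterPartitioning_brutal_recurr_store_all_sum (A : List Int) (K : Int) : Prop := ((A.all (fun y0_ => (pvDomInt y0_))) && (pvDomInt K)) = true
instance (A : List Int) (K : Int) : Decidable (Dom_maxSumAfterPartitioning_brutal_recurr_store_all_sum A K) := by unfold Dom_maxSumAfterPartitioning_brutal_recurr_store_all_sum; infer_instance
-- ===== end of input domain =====

-- B replaces A's exhaustive enumeration of every partition (O(K^N)) with a dynamic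
-- program over suffixes (O(N*K)); equality of return values is proved on Pre_ below.

-- ===== PORT A =====
-- Python max(l) as a total function: (max? l).getD 0; the default is never reached on
-- inputs admitted by Pre_ (every max() in A is applied to a nonempty list there).
def pvMaxD (l : List Int) : Int := (PySem.List.max? l (fun y => y)).getD 0

-- 'searching(nums, res, res_list)': res_list is the accumulator; fuel only makes the
-- recursion structurally terminating (fuel = len(A)+1 at the call site never runs out,
-- since each recursive call drops at least one element).
def pvSearchA (K : Int) : Nat → List Int → Int → List Int → List Int
  | 0, _, _, acc => acc
  | fuel+1, nums, res, acc =>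
    if nums.length = 0 then acc ++ [res]
    else
      (PySem.List.pyRange 1 (min (K+1) ((nums.length : Int)+1)) 1).foldl
        (fun a i =>
          pvSearchA K fuel (PySem.List.slice nums (some i) none)
            (res + pvMaxD (PySem.List.slice nums none (some i)) * i) a)
        acc

def maxSumAfterPartitioning_brutal_recurr_store_all_sum (A : List Int) (K : Int) : Int :=
  if K = 1 then A.sum
  else if K ≥ (A.length : Int) then pvMaxD A * (A.length : Int)
  else
    -- N is computed by A but never used (dead code in the Python)
    let N0 := PySem.Int.floordiv (A.length : Int) K
    let _N := if N0 * K ≠ (A.length : Int) then N0 + 1 else N0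
    pvMaxD (pvSearchA K (A.length + 1) A 0 [])

-- ===== PORT B =====
-- inner loop 'for j in range(2, min(K, len(dp)) + 1)': xs are the elements A[i+1..],
-- ds the dp entries dp[1..]; cur is the running max of the current block.
def pvBestLoopB (K : Int) : Int → Int → Int → List Int → List Int → Int
  | cur, best, j, x :: xs, d :: ds =>
      if j ≤ K then
        let cur' := max cur x
        let cand := cur' * j + d
        pvBestLoopB K cur' (if cand > best then cand else best) (j+1) xs ds
      else best
  | _, best, _, _, _ => best

-- the outer loop 'for i in range(len(A)-1, -1, -1): … dp.insert(0, best)' builds dp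
-- back-to-front; here dp is built by structural recursion on the suffix.
def pvDpB (K : Int) : List Int → List Int
  | [] => [0]
  | a :: rest =>
      let ds := pvDpB K rest
      pvBestLoopB K a (a + ds.headD 0) 2 rest ds.tail :: ds

def maxSumAfterPartitioning_brutal_recurr_store_all_sum_alt (A : List Int) (K : Int) : Int :=
  (pvDpB K A).headD 0

-- ===== PRECONDITION & SPEC =====
-- Pre_ excludes exactly the inputs where A raises ValueError on max() of an empty list:
-- K < 1 with nonempty A (or K = 0 with A = []), and A = [] with 2 ≤ K.  (A = [] with
-- K < 0 stays inside Pre_: there A reaches the search and returns 0, as does B.)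
def Pre_maxSumAfterPartitioning_brutal_recurr_store_all_sum (A : List Int) (K : Int) : Prop :=
  (1 ≤ K ∧ (K = 1 ∨ A ≠ [])) ∨ (A = [] ∧ K < 0)
instance (A : List Int) (K : Int) : Decidable (Pre_maxSumAfterPartitioning_brutal_recurr_store_all_sum A K) := by unfold Pre_maxSumAfterPartitioning_brutal_recurr_store_all_sum; infer_instance

def pvWitness_maxSumAfterPartitioning_brutal_recurr_store_all_sum : List Int × Int := ([1, 15, 7, 9, 2, 5, 10], 3)

def Spec_maxSumAfterPartitioning_brutal_recurr_store_all_sum (A : List Int) (K : Int) (out : Int) : Prop := out = maxSumAfterPartitioning_brutal_recurr_store_all_sum_alt A K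
instance (A : List Int) (K : Int) (out : Int) : Decidable (Spec_maxSumAfterPartitioning_brutal_recurr_store_all_sum A K out) := by unfold Spec_maxSumAfterPartitioning_brutal_recurr_store_all_sum; infer_instance

-- ===== CLAIM (what is proved, stated in full; the proofs are below) =====
def Claim_equal_maxSumAfterPartitioning_brutal_recurr_store_all_sum : Prop := ∀ (A : List Int) (K : Int), Dom_maxSumAfterPartitioning_brutal_recurr_store_all_sum A K → Pre_maxSumAfterPartitioning_brutal_recurr_store_all_sum A K → Spec_maxSumAfterPartitioning_brutal_recurr_store_all_sum A K (maxSumAfterPartitioning_brutal_recurr_store_all_sum A K)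

-- ===== LEMMAS AND PROOFS =====

-- the optimal partition value of a suffix, as computed by B's dp
def pvOpt (K : Int) (l : List Int) : Int := (pvDpB K l).headD 0

theorem pvMaxD_eq {l : List Int} {v : Int} (hm : v ∈ l) (hub : ∀ y ∈ l, y ≤ v) :
    pvMaxD l = v := by
  cases l with
  | nil => cases hm
  | cons x t =>
    simp only [pvMaxD, PySem.List.max?_id_cons, Option.getD_some]
    have h1 := PySem.List.le_foldl_max t x
    have hub' : t.foldl max x ≤ v := by
      rcases PySem.List.foldl_max_mem t x with h | h
      · rw [h]; exact hub x (List.mem_cons_self)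
      · exact hub _ (List.mem_cons_of_mem _ h)
    have hv : v ≤ t.foldl max x := by
      rcases List.mem_cons.mp hm with h | h
      · subst h; exact h1.1
      · exact h1.2 v h
    omega

theorem pvDpB_length (K : Int) (l : List Int) : (pvDpB K l).length = l.length + 1 := by
  induction l with
  | nil => rfl
  | cons a rest ih => simp [pvDpB, ih]

theorem pvDpB_getD (K : Int) : ∀ (l : List Int) (t : Nat), t ≤ l.length →
    (pvDpB K l).getD t 0 = pvOpt K (l.drop t) := by
  intro l
  induction l with
  | nil => intro t ht; simp only [List.length_nil, Nat.le_zero] at ht; subst ht; rfl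
  | cons a rest ih =>
    intro t ht
    cases t with
    | zero => rfl
    | succ t => simpa [pvDpB] using ih t (by simpa using ht)

theorem pvBestLoopB_le (K : Int) : ∀ (xs ds : List Int) (cur best j : Int),
    best ≤ pvBestLoopB K cur best j xs ds := by
  intro xs
  induction xs with
  | nil => intro ds cur best j; cases ds <;> simp [pvBestLoopB]
  | cons x xs ih =>
    intro ds cur best j
    cases ds with
    | nil => simp [pvBestLoopB]
    | cons d ds =>
      rw [pvBestLoopB]
      split
      · refine le_trans ?_ (ih ds (max cur x) _ (j+1))
        split <;> omega
      · exact le_refl _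

theorem pvBestLoopB_of_lt {K j : Int} (h : K < j) (xs ds : List Int) (cur best : Int) :
    pvBestLoopB K cur best j xs ds = best := by
  cases xs with
  | nil => cases ds <;> rfl
  | cons x xs => cases ds with
    | nil => rfl
    | cons d ds => rw [pvBestLoopB]; rw [if_neg (by omega)]

theorem pvBestLoopB_ub (K : Int) : ∀ (t : Nat) (xs ds : List Int) (cur best j : Int),
    t < xs.length → t < ds.length → j + t ≤ K →
    ((xs.take (t+1)).foldl max cur) * (j + t) + ds.getD t 0 ≤ pvBestLoopB K cur best j xs ds := by
  intro t
  induction t with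
  | zero =>
    intro xs ds cur best j hx hd hK
    cases xs with
    | nil => simp at hx
    | cons x xs =>
      cases ds with
      | nil => simp at hd
      | cons d ds =>
        rw [pvBestLoopB, if_pos (by push_cast at hK ⊢; omega)]
        refine le_trans ?_ (pvBestLoopB_le K xs ds (max cur x) _ (j+1))
        simp only [List.take_succ_cons, List.take_zero, List.foldl_cons, List.foldl_nil,
          List.getD_cons_zero, Nat.cast_zero, add_zero]
        split <;> omega
  | succ t ih =>
    intro xs ds cur best j hx hd hK
    cases xs with
    | nil => simp at hx
    | cons x xs =>
      cases ds with
      | nil => simp at hd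
      | cons d ds =>
        rw [pvBestLoopB, if_pos (by push_cast at hK ⊢; omega)]
        have := ih xs ds (max cur x) (if (max cur x) * j + d > best then (max cur x) * j + d else best) (j+1)
          (by simpa using hx) (by simpa using hd) (by push_cast at hK ⊢; omega)
        refine le_trans (le_of_eq ?_) this
        simp only [List.take_succ_cons, List.foldl_cons, List.getD_cons_succ]
        push_cast
        ring_nf

theorem pvBestLoopB_mem (K : Int) : ∀ (xs ds : List Int) (cur best j : Int),
    pvBestLoopB K cur best j xs ds = best ∨
    ∃ t : Nat, t < xs.length ∧ t < ds.length ∧ j + t ≤ K ∧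
      pvBestLoopB K cur best j xs ds = ((xs.take (t+1)).foldl max cur) * (j + t) + ds.getD t 0 := by
  intro xs
  induction xs with
  | nil => intro ds cur best j; left; cases ds <;> rfl
  | cons x xs ih =>
    intro ds cur best j
    cases ds with
    | nil => left; rfl
    | cons d ds =>
      by_cases hjK : j ≤ K
      · rw [pvBestLoopB, if_pos hjK]
        rcases ih ds (max cur x) (if (max cur x) * j + d > best then (max cur x) * j + d else best) (j+1) with h | ⟨t, ht1, ht2, ht3, ht4⟩
        · by_cases hc : (max cur x) * j + d > best
          · right
            refine ⟨0, by simp, by simp, by push_cast; omega, ?_⟩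
            rw [h, if_pos hc]
            simp
          · left; rw [h, if_neg hc]
        · right
          refine ⟨t+1, by simpa using ht1, by simpa using ht2, by push_cast at ht3 ⊢; omega, ?_⟩
          rw [ht4]
          simp only [List.take_succ_cons, List.foldl_cons, List.getD_cons_succ]
          push_cast
          ring_nf
      · left; rw [pvBestLoopB, if_neg hjK]

theorem pvOpt_nil (K : Int) : pvOpt K [] = 0 := rfl

theorem pvOpt_cons (K a : Int) (rest : List Int) :
    pvOpt K (a :: rest) = pvBestLoopB K a (a + pvOpt K rest) 2 rest (pvDpB K rest).tail := rfl

theorem pvMaxD_cons (x : Int) (t : List Int) : pvMaxD (x :: t) = t.foldl max x := by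
  simp [pvMaxD, PySem.List.max?_id_cons]

theorem pvDpB_tail_getD (K : Int) (l : List Int) (t : Nat) (ht : t < l.length) :
    (pvDpB K l).tail.getD t 0 = pvOpt K (l.drop (t+1)) := by
  cases l with
  | nil => simp at ht
  | cons r rs =>
    show (pvDpB K rs).getD t 0 = _
    rw [pvDpB_getD K rs t (by simpa using Nat.lt_succ_iff.mp (by simpa using ht))]
    rfl

theorem pvOpt_ub {K : Int} (a : Int) (rest : List Int) (i : Nat)
    (h1 : 1 ≤ i) (hiK : (i : Int) ≤ K) (hil : i ≤ rest.length + 1) :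
    pvMaxD ((a :: rest).take i) * i + pvOpt K ((a :: rest).drop i) ≤ pvOpt K (a :: rest) := by
  rw [pvOpt_cons]
  match i, h1 with
  | 1, _ =>
    simp only [List.take_succ_cons, List.take_zero, List.drop_succ_cons, List.drop_zero,
      pvMaxD_cons, List.foldl_nil, Nat.cast_one, mul_one]
    exact pvBestLoopB_le K rest _ a (a + pvOpt K rest) 2
  | (t+2), _ =>
    have hx : t < rest.length := by omega
    have hd : t < (pvDpB K rest).tail.length := by
      simp [List.length_tail, pvDpB_length]; omega
    have hub := pvBestLoopB_ub K t rest (pvDpB K rest).tail a (a + pvOpt K rest) 2 hx hd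
      (by push_cast at hiK ⊢; omega)
    rw [pvDpB_tail_getD K rest t hx] at hub
    refine le_trans (le_of_eq ?_) hub
    simp only [List.take_succ_cons, List.drop_succ_cons, pvMaxD_cons]
    push_cast
    ring_nf

theorem pvOpt_mem {K : Int} (hK : 1 ≤ K) (a : Int) (rest : List Int) :
    ∃ i : Nat, 1 ≤ i ∧ (i : Int) ≤ K ∧ i ≤ rest.length + 1 ∧
      pvOpt K (a :: rest) = pvMaxD ((a :: rest).take i) * i + pvOpt K ((a :: rest).drop i) := by
  rw [pvOpt_cons]
  rcases pvBestLoopB_mem K rest (pvDpB K rest).tail a (a + pvOpt K rest) 2 with h | ⟨t, ht1, ht2, ht3, ht4⟩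
  · refine ⟨1, le_refl 1, by exact_mod_cast hK, by omega, ?_⟩
    rw [h]
    simp [pvMaxD_cons]
  · refine ⟨t+2, by omega, by push_cast at ht3 ⊢; omega, by omega, ?_⟩
    rw [ht4, pvDpB_tail_getD K rest t ht1]
    simp only [List.take_succ_cons, List.drop_succ_cons, pvMaxD_cons]
    push_cast
    ring_nf

theorem pvSearchA_append (K : Int) : ∀ (fuel : Nat) (nums : List Int) (res : Int) (acc : List Int),
    pvSearchA K fuel nums res acc = acc ++ pvSearchA K fuel nums res [] := by
  intro fuel
  induction fuel with
  | zero => intro nums res acc; simp [pvSearchA]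
  | succ fuel ih =>
    intro nums res acc
    by_cases h : nums.length = 0
    · simp [pvSearchA, h]
    · rw [pvSearchA, if_neg h, pvSearchA, if_neg h]
      rw [PySem.List.foldl_congr_mem _ _ (fun a i =>
        a ++ pvSearchA K fuel (PySem.List.slice nums (some i) none)
          (res + pvMaxD (PySem.List.slice nums none (some i)) * i) []) acc
        (fun a i _ => ih _ _ a)]
      rw [PySem.List.foldl_congr_mem _ _ (fun a i =>
        a ++ pvSearchA K fuel (PySem.List.slice nums (some i) none)
          (res + pvMaxD (PySem.List.slice nums none (some i)) * i) []) []
        (fun a i _ => ih _ _ a)]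
      rw [PySem.List.foldl_append_eq_flatMap, PySem.List.foldl_append_eq_flatMap]
      simp

theorem pvSearchA_cons (K : Int) (fuel : Nat) (nums : List Int) (res : Int) (h : nums.length ≠ 0) :
    pvSearchA K (fuel+1) nums res [] =
      (PySem.List.pyRange 1 (min (K+1) ((nums.length : Int)+1)) 1).flatMap
        (fun i => pvSearchA K fuel (PySem.List.slice nums (some i) none)
          (res + pvMaxD (PySem.List.slice nums none (some i)) * i) []) := by
  rw [pvSearchA, if_neg h]
  rw [PySem.List.foldl_congr_mem _ _ (fun a i =>
    a ++ pvSearchA K fuel (PySem.List.slice nums (some i) none)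
      (res + pvMaxD (PySem.List.slice nums none (some i)) * i) []) []
    (fun a i _ => pvSearchA_append K fuel _ _ a)]
  rw [PySem.List.foldl_append_eq_flatMap]
  simp

theorem pvSearchA_main {K : Int} (hK : 1 ≤ K) :
    ∀ (n : Nat) (nums : List Int) (res : Int) (fuel : Nat),
    nums.length ≤ n → nums.length < fuel →
    (res + pvOpt K nums) ∈ pvSearchA K fuel nums res [] ∧
      ∀ y ∈ pvSearchA K fuel nums res [], y ≤ res + pvOpt K nums := by
  intro n
  induction n with
  | zero =>
    intro nums res fuel hn hf
    have hnil : nums = [] := List.length_eq_zero_iff.mp (Nat.le_zero.mp hn)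
    subst hnil
    obtain ⟨f, rfl⟩ : ∃ f, fuel = f + 1 := ⟨fuel - 1, by omega⟩
    simp [pvSearchA, pvOpt_nil]
  | succ n ih =>
    intro nums res fuel hn hf
    cases nums with
    | nil =>
      obtain ⟨f, rfl⟩ : ∃ f, fuel = f + 1 := ⟨fuel - 1, by omega⟩
      simp [pvSearchA, pvOpt_nil]
    | cons a rest =>
      obtain ⟨f, rfl⟩ : ∃ f, fuel = f + 1 := ⟨fuel - 1, by omega⟩
      simp only [List.length_cons] at hn hf
      rw [pvSearchA_cons K f _ res (by simp)]
      constructor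
      · obtain ⟨i, hi1, hiK, hil, heq⟩ := pvOpt_mem hK a rest
        rw [List.mem_flatMap]
        refine ⟨(i : Int), ?_, ?_⟩
        · rw [PySem.List.mem_pyRange_one]
          refine ⟨by exact_mod_cast hi1, lt_min (by omega) (by simp only [List.length_cons]; push_cast; omega)⟩
        · rw [PySem.List.slice_from_natCast, PySem.List.slice_to_natCast]
          have hlen : ((a :: rest).drop i).length ≤ n := by
            simp only [List.length_drop, List.length_cons]; omega
          have hfu : ((a :: rest).drop i).length < f := by
            simp only [List.length_drop, List.length_cons]; omega
          have hmem := (ih _ (res + pvMaxD ((a :: rest).take i) * i) f hlen hfu).1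
          rw [heq, show res + (pvMaxD ((a :: rest).take i) * i + pvOpt K ((a :: rest).drop i))
            = (res + pvMaxD ((a :: rest).take i) * i) + pvOpt K ((a :: rest).drop i) by ring]
          exact hmem
      · intro y hy
        rw [List.mem_flatMap] at hy
        obtain ⟨i, hir, hmem⟩ := hy
        rw [PySem.List.mem_pyRange_one] at hir
        obtain ⟨hi1, hi2⟩ := hir
        have hiK : i ≤ K := by have := min_le_left (K+1) (((a :: rest).length : Int)+1); omega
        have hilen : i ≤ ((a :: rest).length : Int) := by
          have := min_le_right (K+1) (((a :: rest).length : Int)+1); omega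
        simp only [List.length_cons] at hilen
        have hiN : ((i.toNat : Int)) = i := Int.toNat_of_nonneg (by omega)
        rw [← hiN, PySem.List.slice_from_natCast, PySem.List.slice_to_natCast] at hmem
        have hlen : ((a :: rest).drop i.toNat).length ≤ n := by
          simp only [List.length_drop, List.length_cons]; omega
        have hfu : ((a :: rest).drop i.toNat).length < f := by
          simp only [List.length_drop, List.length_cons]; omega
        have hub := (ih _ (res + pvMaxD ((a :: rest).take i.toNat) * i.toNat) f hlen hfu).2 y hmem
        have hcand := pvOpt_ub (K := K) a rest i.toNat (by omega) (by omega) (by omega)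
        rw [hiN] at hub hcand
        linarith

theorem pvOpt_K1 : ∀ (l : List Int), pvOpt 1 l = l.sum := by
  intro l
  induction l with
  | nil => rfl
  | cons a rest ih =>
    rw [pvOpt_cons, pvBestLoopB_of_lt (by norm_num), ih, List.sum_cons]

theorem pvOpt_le {K M : Int} (hK : 1 ≤ K) : ∀ (n : Nat) (l : List Int),
    l.length ≤ n → (∀ x ∈ l, x ≤ M) → pvOpt K l ≤ M * l.length := by
  intro n
  induction n with
  | zero =>
    intro l hn _
    have : l = [] := List.length_eq_zero_iff.mp (Nat.le_zero.mp hn)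
    subst this; simp [pvOpt_nil]
  | succ n ih =>
    intro l hn hub
    cases l with
    | nil => simp [pvOpt_nil]
    | cons a rest =>
      simp only [List.length_cons] at hn
      obtain ⟨i, hi1, hiK, hil, heq⟩ := pvOpt_mem hK a rest
      rw [heq]
      have h1 : pvMaxD ((a :: rest).take i) ≤ M := by
        obtain ⟨t, rfl⟩ : ∃ t, i = t + 1 := ⟨i - 1, by omega⟩
        rw [List.take_succ_cons, pvMaxD_cons]
        rcases PySem.List.foldl_max_mem (rest.take t) a with h | h
        · rw [h]; exact hub a List.mem_cons_self
        · exact hub _ (List.mem_cons_of_mem _ (List.mem_of_mem_take h))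
      have h2 : pvOpt K ((a :: rest).drop i) ≤ M * ((a :: rest).drop i).length := by
        refine ih _ (by simp only [List.length_drop, List.length_cons]; omega) ?_
        exact fun x hx => hub x (List.mem_of_mem_drop hx)
      have h3 : pvMaxD ((a :: rest).take i) * i ≤ M * i :=
        mul_le_mul_of_nonneg_right h1 (Int.natCast_nonneg i)
      have h4 : (((a :: rest).drop i).length : Int) = ((a :: rest).length : Int) - i := by
        rw [List.length_drop]
        have : i ≤ (a :: rest).length := by simp only [List.length_cons]; omega
        push_cast [Nat.cast_sub this]
        ring
      rw [h4] at h2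
      have : M * i + (M * (((a :: rest).length : Int) - i)) = M * ((a :: rest).length : Int) := by ring
      linarith

theorem pvOpt_maxlen {K : Int} {A : List Int} (hK : 1 ≤ K) (hA : A ≠ [])
    (hlen : (A.length : Int) ≤ K) : pvOpt K A = pvMaxD A * A.length := by
  cases A with
  | nil => exact absurd rfl hA
  | cons a rest =>
    have hub : ∀ x ∈ (a :: rest), x ≤ pvMaxD (a :: rest) := by
      intro x hx
      rw [pvMaxD_cons]
      rcases List.mem_cons.mp hx with h | h
      · exact h ▸ (PySem.List.le_foldl_max rest a).1
      · exact (PySem.List.le_foldl_max rest a).2 x h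
    have h1 := pvOpt_le hK (a :: rest).length (a :: rest) (le_refl _) hub
    have h2 := pvOpt_ub (K := K) a rest (rest.length + 1) (by omega)
      (by push_cast at hlen ⊢; simp only [List.length_cons] at hlen; push_cast at hlen; omega)
      (le_refl _)
    rw [show rest.length + 1 = (a :: rest).length from rfl, List.take_length, List.drop_length,
      pvOpt_nil, add_zero] at h2
    omega

-- ===== VERDICT (by name: the statement is the Claim_ definition above) =====
theorem maxSumAfterPartitioning_brutal_recurr_store_all_sum_spec : Claim_equal_maxSumAfterPartitioning_brutal_recurr_store_all_sum := by
  intro A K _hDom hPre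
  unfold Spec_maxSumAfterPartitioning_brutal_recurr_store_all_sum
  unfold maxSumAfterPartitioning_brutal_recurr_store_all_sum
  rcases hPre with ⟨hK, hor⟩ | ⟨rfl, hKneg⟩
  case inr =>
    rw [if_neg (by omega), if_neg (by simp only [List.length_nil]; push_cast; omega)]
    rfl
  by_cases hK1 : K = 1
  · subst hK1
    rw [if_pos rfl]
    exact (pvOpt_K1 A).symm
  · have hA : A ≠ [] := hor.resolve_left hK1
    rw [if_neg hK1]
    by_cases hlen : K ≥ (A.length : Int)
    · rw [if_pos hlen]
      exact (pvOpt_maxlen hK hA hlen).symm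
    · rw [if_neg hlen]
      have h := pvSearchA_main hK A.length A 0 (A.length + 1) (le_refl _) (by omega)
      show pvMaxD (pvSearchA K (A.length + 1) A 0 []) = _
      rw [pvMaxD_eq h.1 h.2]
      show 0 + pvOpt K A = pvOpt K A
      ring
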